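-- pv_equiv track=rewrite | github.com/pypi-data/pypi-mirror-175 | packages/ConfNet/ConfNet-0.0.1-py2.py3-none-any.whl/ConfNet/cluster/cluster.py | find_cluster
-- ===== SOURCE A (Python) =====
-- def find_cluster(index, labels):
--     find_dic = {}
--     for i, label in enumerate(labels):
--         if not label in find_dic:
--             find_dic[label] = []
--         find_dic[label].append(i)
--
--     i_label = labels[index]
--
--     result = find_dic[i_label]
--
--     return result
-- ===== SOURCE B (Python) =====
-- def find_cluster(index, labels):
--     target = labels[index]
--     return [i for i, label in enumerate(labels) if label == target]
-- ===== Notes on version B (the rewrite author's own statement) =====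
-- stated objective: simpler
-- what changed: B reads the target label first and does a single filtering scan over enumerate(labels), maintaining only the result list, instead of grouping all labels into a dict of index buckets and looking one bucket up.
import Mathlib
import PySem

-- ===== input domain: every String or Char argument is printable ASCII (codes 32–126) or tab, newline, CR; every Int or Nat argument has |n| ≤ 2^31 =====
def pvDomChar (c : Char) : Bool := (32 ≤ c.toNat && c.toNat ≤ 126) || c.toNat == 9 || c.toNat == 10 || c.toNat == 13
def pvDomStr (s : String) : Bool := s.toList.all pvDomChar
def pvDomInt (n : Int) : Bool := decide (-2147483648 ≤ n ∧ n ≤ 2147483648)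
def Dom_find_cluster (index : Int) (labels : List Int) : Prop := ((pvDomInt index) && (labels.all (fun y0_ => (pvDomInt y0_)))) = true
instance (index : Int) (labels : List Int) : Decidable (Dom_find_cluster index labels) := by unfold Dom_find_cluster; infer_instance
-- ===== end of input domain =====

-- B replaces A's dict of index buckets with a single filtering scan for the target label (same O(n) cost, simpler).

-- ===== PORT A =====
def find_cluster (index : Int) (labels : List Int) : List Int :=
  let find_dic : PySem.Dict Int (List Int) :=
    (PySem.List.enumerate labels 0).foldl
      (fun d p =>
        (if d.contains p.2 then d else d.insert p.2 []).modify p.2 [] (· ++ [p.1]))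
      PySem.Dict.empty
  let i_label := PySem.List.pyGetD labels index 0   -- labels[index]; IndexError excluded by Pre_
  -- find_dic[i_label]: the key is present whenever index is in range, so the default is never used
  (find_dic.get? i_label).getD []

-- ===== PORT B =====
def find_cluster_alt (index : Int) (labels : List Int) : List Int :=
  let target := PySem.List.pyGetD labels index 0    -- labels[index]; IndexError excluded by Pre_
  ((PySem.List.enumerate labels 0).filter (fun p => p.2 == target)).map (·.1)

-- ===== PRECONDITION & SPEC =====
-- A (and B) raise IndexError on labels[index] when index is out of range; exactly those inputs are excluded.
def Pre_find_cluster (index : Int) (labels : List Int) : Prop :=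
  PySem.Raise.InRange labels.length index
instance (index : Int) (labels : List Int) : Decidable (Pre_find_cluster index labels) := by
  unfold Pre_find_cluster; infer_instance
def pvWitness_find_cluster : Int × List Int := (0, [3, 1, 3])

def Spec_find_cluster (index : Int) (labels : List Int) (out : List Int) : Prop := out = find_cluster_alt index labels
instance (index : Int) (labels : List Int) (out : List Int) : Decidable (Spec_find_cluster index labels out) := by unfold Spec_find_cluster; infer_instance

-- ===== CLAIM (what is proved, stated in full; the proofs are below) =====
def Claim_equal_find_cluster : Prop := ∀ (index : Int) (labels : List Int), Dom_find_cluster index labels → Pre_find_cluster index labels → Spec_find_cluster index labels (find_cluster index labels)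

-- ===== LEMMAS AND PROOFS =====

-- A's grouping loop, characterised: the bucket of t collects the first components of the
-- enumerate pairs whose label is t, appended after whatever d already held at t.
lemma dict_fold_getD (l : List (Int × Int)) (d : PySem.Dict Int (List Int)) (t : Int) :
    (l.foldl
      (fun d p => (if d.contains p.2 then d else d.insert p.2 []).modify p.2 [] (· ++ [p.1]))
      d).getD t []
    = d.getD t [] ++ (l.filter (fun p => p.2 == t)).map (·.1) := by
  induction l generalizing d with
  | nil => simp
  | cons p l ih =>
      simp only [List.foldl_cons, ih, List.filter_cons]
      have hstep : ((if d.contains p.2 then d else d.insert p.2 []).modify p.2 [] (· ++ [p.1])).getD t []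
          = if t = p.2 then d.getD p.2 [] ++ [p.1] else d.getD t [] := by
        rw [PySem.Dict.getD_modify]
        by_cases h : t = p.2
        · subst h
          by_cases hc : d.contains p.2 = true
          · simp [hc]
          · have hnc : d.contains p.2 = false := by simpa using hc
            simp [hc, PySem.Dict.getD_insert_self,
                  PySem.Dict.getD_of_not_contains d _ hnc]
        · by_cases hc : d.contains p.2 = true
          · simp [h, hc]
          · simp [h, hc, PySem.Dict.getD_insert_of_ne d _ _ h]
      rw [hstep]
      by_cases h : p.2 = t
      · simp [h, List.map_cons]
      · have h' : t ≠ p.2 := fun e => h e.symm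
        simp [h, h']

-- ===== VERDICT (by name: the statement is the Claim_ definition above) =====
theorem find_cluster_spec : Claim_equal_find_cluster := by
  intro index labels _ _
  unfold Spec_find_cluster find_cluster find_cluster_alt
  rw [← PySem.Dict.getD_eq_get?_getD, dict_fold_getD]
  simp [PySem.Dict.getD_empty]
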